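-- pv_equiv track=rewrite | github.com/xpessoles/Informatique | Divers/TP_SPE_Supplementaires/TD_SimNum_01/programmes/TD_02_XP.py | depiler
-- ===== SOURCE A (Python) =====
-- def est_vide(pile):
--     for el in pile :
--         if el != None :
--             return False
--     return True
--
-- def est_pleine(pile):
--     return (not None in pile)
--
-- def depiler(pile):
--     if est_vide(pile):
--         return None
--     # On recherche le premier emplacement vide
--     if est_pleine(pile):
--         l = len(pile)
--         el = pile[l-1]
--         pile[l-1]=None
--         return el
--     i=0
--     while pile[i]!= None:
--         i=i+1
--     el = pile[i-1]
--     pile[i-1]=None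
--     return el
-- ===== SOURCE B (Python) =====
-- def depiler(pile):
--     if not pile:
--         return None
--     # One forward pass carrying the previous element (seeded with pile[-1], so the
--     # wrap-around at the first slot falls out of the accumulator for free): the first
--     # None slot yields the carried value; if no slot is None the stack is full and
--     # the carried value at the end is the last element.
--     prev = pile[-1]
--     for j, x in enumerate(pile):
--         if x == None:
--             pile[j - 1] = None
--             return prev
--         prev = x
--     pile[-1] = None
--     return prev
-- ===== Notes on version B (the rewrite author's own statement) =====
-- stated objective: simpler
-- what changed: Instead of locating the index of the first empty slot (est_vide pre-scan, est_pleine membership test, while-loop, then indexing the preceding cell with wraparound), B makes one forward pass carrying the previous element as an accumulator seeded with the last element: the first None slot yields the carried value and a loop that finishes yields the last element, so no index search, no index arithmetic and no separate empty/full cases exist at all.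
import Mathlib
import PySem

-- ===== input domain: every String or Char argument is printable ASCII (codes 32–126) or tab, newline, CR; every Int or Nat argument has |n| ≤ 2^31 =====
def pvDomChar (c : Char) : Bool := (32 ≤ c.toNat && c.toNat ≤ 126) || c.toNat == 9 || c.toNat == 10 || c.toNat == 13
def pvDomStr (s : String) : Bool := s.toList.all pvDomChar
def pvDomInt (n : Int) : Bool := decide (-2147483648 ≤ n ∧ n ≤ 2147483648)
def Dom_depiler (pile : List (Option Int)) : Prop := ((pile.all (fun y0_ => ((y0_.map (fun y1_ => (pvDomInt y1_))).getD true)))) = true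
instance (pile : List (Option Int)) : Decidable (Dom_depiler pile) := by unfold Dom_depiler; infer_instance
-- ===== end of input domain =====

-- B replaces A's index-of-first-None search (est_vide pre-scan, est_pleine membership test,
-- while-loop, pile[i-1] wrap arithmetic) by one pass carrying the previous element as an
-- accumulator seeded with pile[-1] (objective: simpler). Both A and B mutate `pile`
-- identically in Python; the equivalence proved here is about the RETURN value.

-- ===== PORT A =====
def estVide : List (Option Int) → Bool
  | [] => true
  | el :: rest => if el ≠ none then false else estVide rest

def estPleine (pile : List (Option Int)) : Bool := !(pile.contains none)

-- while pile[i] != None: i = i + 1   (Python would raise IndexError at i = len; that branch is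
-- unreachable in depiler, where the loop only runs when `none` occurs in pile)
def depilerWhile (pile : List (Option Int)) (i : Nat) : Nat :=
  if h : i < pile.length then
    if pile[i] ≠ none then depilerWhile pile (i + 1) else i
  else i
termination_by pile.length - i

def depiler (pile : List (Option Int)) : Option Int :=
  if estVide pile then none
  else if estPleine pile then
    let l := pile.length
    match PySem.List.pyGet? pile ((l : Int) - 1) with
    | some el => el
    | none => none   -- IndexError: unreachable (pile nonempty here)
  else
    let i := depilerWhile pile 0
    match PySem.List.pyGet? pile ((i : Int) - 1) with
    | some el => el
    | none => none   -- IndexError: unreachable (pile nonempty here)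

-- ===== PORT B =====
-- the for-loop: `prev` is the carried accumulator; the first None yields it,
-- a finished loop yields the last element carried
def depilerGo : List (Option Int) → Option Int → Option Int
  | [], prev => prev
  | x :: rest, prev => if x = none then prev else depilerGo rest x

def depiler_alt (pile : List (Option Int)) : Option Int :=
  match pile with
  | [] => none
  | a :: t => depilerGo (a :: t) ((a :: t).getLast (List.cons_ne_nil a t))   -- prev = pile[-1]

-- ===== PRECONDITION & SPEC =====
def Spec_depiler (pile : List (Option Int)) (out : Option Int) : Prop := out = depiler_alt pile
instance (pile : List (Option Int)) (out : Option Int) : Decidable (Spec_depiler pile out) := by unfold Spec_depiler; infer_instance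

-- ===== CLAIM (what is proved, stated in full; the proofs are below) =====
def Claim_equal_depiler : Prop := ∀ (pile : List (Option Int)), Dom_depiler pile → Spec_depiler pile (depiler pile)

-- ===== LEMMAS AND PROOFS =====

lemma estVide_iff (l : List (Option Int)) : estVide l = true ↔ ∀ x ∈ l, x = none := by
  induction l with
  | nil => simp [estVide]
  | cons a t ih => by_cases h : a = none <;> simp [estVide, h, ih]

-- A's while loop finds the first index of `none` at or after i (or len, had Python not raised)
lemma depilerWhile_spec (l : List (Option Int)) : ∀ (i : Nat), i ≤ l.length →
    depilerWhile l i = (match PySem.List.index? (l.drop i) none with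
      | some k => i + k
      | none => l.length) := by
  intro i hi
  induction hn : l.length - i generalizing i with
  | zero =>
    have hi' : i = l.length := by omega
    subst hi'
    rw [depilerWhile]
    simp [PySem.List.index?]
  | succ n ih =>
    have hlt : i < l.length := by omega
    rw [depilerWhile, List.drop_eq_getElem_cons hlt]
    by_cases h : l[i] = none
    · rw [h, PySem.List.index?_cons_self]
      simp [hlt, h]
    · rw [PySem.List.index?_cons_of_ne _ h,
        ih (i + 1) (by omega) (by omega)]
      simp only [dif_pos hlt, if_pos (by simpa using h)]
      cases PySem.List.index? (l.drop (i + 1)) none with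
      | none => simp
      | some k =>
        show i + 1 + k = i + (k + 1)
        omega

-- B's loop, characterised by the position of the first None in the remaining list
lemma depilerGo_spec (l : List (Option Int)) : ∀ (prev : Option Int),
    depilerGo l prev = (match PySem.List.index? l none with
      | some 0 => prev
      | some (k + 1) => (l[k]?).getD none
      | none => l.getLast?.getD prev) := by
  induction l with
  | nil => intro prev; simp [depilerGo, PySem.List.index?]
  | cons a t ih =>
    intro prev
    by_cases ha : a = none
    · subst ha
      rw [PySem.List.index?_cons_self]
      simp [depilerGo]
    · rw [depilerGo, if_neg ha, PySem.List.index?_cons_of_ne _ ha, ih a]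
      cases hidx : PySem.List.index? t none with
      | none =>
        simp only [Option.map_none]
        cases t with
        | nil => simp
        | cons b u =>
          simp [List.getLast?_cons_cons,
            List.getLast?_eq_some_getLast (List.cons_ne_nil b u)]
      | some k =>
        cases k with
        | zero => simp
        | succ j => simp
  
lemma depiler_eq (pile : List (Option Int)) : depiler pile = depiler_alt pile := by
  cases pile with
  | nil => decide
  | cons a t =>
    have hne : a :: t ≠ [] := List.cons_ne_nil a t
    have halt : depiler_alt (a :: t) = depilerGo (a :: t) ((a :: t).getLast hne) := rfl
    have hlast : (a :: t).getLast? = some ((a :: t).getLast hne) :=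
      List.getLast?_eq_some_getLast _
    rw [halt, depilerGo_spec]
    unfold depiler
    by_cases hv : estVide (a :: t) = true
    · -- all elements None: A returns None; B's first step yields prev = getLast = none
      have hall := (estVide_iff (a :: t)).1 hv
      have ha : a = none := hall a (by simp)
      have h0 : PySem.List.index? (a :: t) none = some 0 := by
        rw [ha]; exact PySem.List.index?_cons_self _ _
      have hl : (a :: t).getLast hne = none := hall _ (List.getLast_mem _)
      simp only [if_pos hv, h0, hl]
    · by_cases hp : estPleine (a :: t) = true
      · -- full: no None anywhere; A pops pile[len-1], B's finished loop carries the last element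
        have hnone : (none : Option Int) ∉ (a :: t) := by
          simp only [estPleine, Bool.not_eq_true'] at hp
          simpa using hp
        have hidx0 : PySem.List.index? (a :: t) none = none :=
          (PySem.List.index?_eq_none_iff _ _).2 hnone
        have hcast : (((a :: t).length : Int)) - 1 = (((a :: t).length - 1 : Nat) : Int) := by
          simp
        have e1 : PySem.List.pyGet? (a :: t) (((a :: t).length : Int) - 1)
            = some ((a :: t).getLast hne) := by
          rw [hcast, PySem.List.pyGet?_natCast, ← List.getLast?_eq_getElem?, hlast]
        simp only [if_neg hv, if_pos hp, hidx0, hlast, e1, Option.getD_some]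
      · -- some slot is None (but not all): A pops pile[i-1] at the while-loop's index i
        have hmem : (none : Option Int) ∈ (a :: t) := by
          by_contra hm
          exact hp (by simp [estPleine, List.contains_eq_mem, hm])
        obtain ⟨k, hk⟩ := Option.isSome_iff_exists.1
          ((PySem.List.index?_isSome_iff (a :: t) none).2 hmem)
        rw [depilerWhile_spec (a :: t) 0 (Nat.zero_le _), List.drop_zero]
        cases k with
        | zero =>
          -- first slot empty: A reads pile[-1]; B's accumulator still holds its seed pile[-1]
          have e : (((0 + 0 : Nat) : Int)) - 1 = -1 := by norm_num
          simp only [if_neg hv, if_neg hp, hk, e, PySem.List.pyGet?_neg_one, hlast]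
        | succ j =>
          -- A reads pile[(j+1)-1] = pile[j]; B carried exactly that element
          have e : (((0 + (j + 1) : Nat) : Int)) - 1 = ((j : Nat) : Int) := by
            push_cast; ring
          obtain ⟨hjlt, -, -⟩ := PySem.List.getElem_of_index?_eq_some hk
          have hjlt' : j < (a :: t).length := by omega
          simp only [if_neg hv, if_neg hp, hk, e, PySem.List.pyGet?_natCast,
            List.getElem?_eq_getElem hjlt', Option.getD_some]

-- ===== VERDICT (by name: the statement is the Claim_ definition above) =====
theorem depiler_spec : Claim_equal_depiler := by
  intro pile _
  unfold Spec_depiler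
  exact depiler_eq pile
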